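-- pv_equiv track=rewrite | github.com/coderankitajadhav/ankita_jadhav_FBS_Work | Assignment No 8/Q3b.py | sum_of_fact
-- ===== SOURCE A (Python) =====
-- def sum_of_fact(n):
--     if(n < 1):
--         return 0
--     total = 0
--     fact = 1
--     for i in range(1,n+1):
--         fact = fact * i
--         total = total + fact
--     return total
-- ===== SOURCE B (Python) =====
-- def sum_of_fact(n):
--     if n < 1:
--         return 0
--     acc = 1
--     for i in range(n, 0, -1):
--         acc = 1 + i * acc
--     return acc - 1
-- ===== Notes on version B (the rewrite author's own statement) =====
-- stated objective: alternative
-- what changed: Replaces the forward pass maintaining a running factorial and a running total with a single back-to-front Horner evaluation acc = 1 + i*acc over range(n, 0, -1), returning acc - 1; no factorial is ever materialised.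
import Mathlib
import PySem

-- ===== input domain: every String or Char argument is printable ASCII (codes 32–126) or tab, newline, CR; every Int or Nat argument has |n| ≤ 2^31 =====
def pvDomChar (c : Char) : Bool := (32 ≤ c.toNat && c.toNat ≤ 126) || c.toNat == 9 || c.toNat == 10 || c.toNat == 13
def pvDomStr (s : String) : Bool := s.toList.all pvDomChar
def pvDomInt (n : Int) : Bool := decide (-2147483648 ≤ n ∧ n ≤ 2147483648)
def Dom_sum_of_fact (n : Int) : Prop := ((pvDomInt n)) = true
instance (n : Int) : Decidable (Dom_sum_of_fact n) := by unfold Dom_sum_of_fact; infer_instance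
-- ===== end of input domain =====

-- B replaces A's running-factorial forward pass by a back-to-front Horner evaluation
-- (acc = 1 + i*acc over range(n,0,-1), answer acc - 1): an alternative O(n) formulation.


-- ===== PORT A =====
def sum_of_fact (n : Int) : Int :=
  if n < 1 then 0
  else
    ((PySem.List.pyRange 1 (n + 1) 1).foldl
      (fun (s : Int × Int) i => (s.1 + s.2 * i, s.2 * i)) (0, 1)).1

-- ===== PORT B =====
def sum_of_fact_alt (n : Int) : Int :=
  if n < 1 then 0
  else ((PySem.List.pyRange n 0 (-1)).foldl (fun acc i => 1 + i * acc) 1) - 1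

-- ===== PRECONDITION & SPEC =====
def Spec_sum_of_fact (n : Int) (out : Int) : Prop := out = sum_of_fact_alt n
instance (n : Int) (out : Int) : Decidable (Spec_sum_of_fact n out) := by unfold Spec_sum_of_fact; infer_instance

-- ===== CLAIM (what is proved, stated in full; the proofs are below) =====
def Claim_equal_sum_of_fact : Prop := ∀ (n : Int), Dom_sum_of_fact n → Spec_sum_of_fact n (sum_of_fact n)

-- ===== LEMMAS AND PROOFS =====

-- A's forward fold computes (∑ (i+1)!, m!)
theorem keyA (m : Nat) :
    (PySem.List.pyRange 1 ((m : Int) + 1) 1).foldl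
        (fun (s : Int × Int) i => (s.1 + s.2 * i, s.2 * i)) (0, 1)
      = (∑ i ∈ Finset.range m, ((i + 1).factorial : Int), (m.factorial : Int)) := by
  induction m with
  | zero =>
    simp only [Nat.cast_zero, zero_add]
    rw [PySem.List.pyRange_one_eq_nil le_rfl]
    simp
  | succ k ih =>
    have hsplit : PySem.List.pyRange 1 (((k : Int) + 1) + 1) 1
        = PySem.List.pyRange 1 ((k : Int) + 1) 1 ++ [(k : Int) + 1] :=
      PySem.List.pyRange_one_succ_right (by omega)
    push_cast
    rw [hsplit, List.foldl_append, ih]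
    simp only [List.foldl_cons, List.foldl_nil, Finset.sum_range_succ, Prod.mk.injEq]
    constructor
    · push_cast [Nat.factorial_succ]; ring
    · push_cast [Nat.factorial_succ]; ring

-- B's backward Horner fold: m!·a + ∑_{i<m} i!
theorem keyB (m : Nat) (a : Int) :
    (PySem.List.pyRange (m : Int) 0 (-1)).foldl (fun acc i => 1 + i * acc) a
      = (m.factorial : Int) * a + ∑ i ∈ Finset.range m, (i.factorial : Int) := by
  induction m generalizing a with
  | zero =>
    rw [PySem.List.pyRange_neg_one_eq_nil (by norm_num)]
    simp
  | succ k ih =>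
    have hcons : PySem.List.pyRange ((k : Int) + 1) 0 (-1)
        = ((k : Int) + 1) :: PySem.List.pyRange (((k : Int) + 1) - 1) 0 (-1) :=
      PySem.List.pyRange_neg_one_cons (by omega)
    push_cast
    rw [hcons, List.foldl_cons, show ((k : Int) + 1) - 1 = (k : Int) by ring, ih]
    rw [Finset.sum_range_succ (fun i => ((Nat.factorial i : Int)))]
    rw [Nat.factorial_succ]
    push_cast
    ring

theorem sum_of_fact_eq_alt (n : Int) : sum_of_fact n = sum_of_fact_alt n := by
  unfold sum_of_fact sum_of_fact_alt
  by_cases h : n < 1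
  · simp [h]
  · rw [if_neg h, if_neg h]
    have hm : n = ((n.toNat : Int)) := by omega
    rw [hm, keyA, keyB]
    have hshift : ∑ i ∈ Finset.range n.toNat, (((i + 1).factorial : Int))
        = (∑ i ∈ Finset.range n.toNat, ((i.factorial : Int))) + (n.toNat.factorial : Int) - 1 := by
      have := Finset.sum_range_succ' (fun i => ((Nat.factorial i : Int))) n.toNat
      rw [Finset.sum_range_succ (fun i => ((Nat.factorial i : Int))) n.toNat] at this
      simp only [Nat.factorial_zero, Nat.cast_one] at this
      omega
    rw [hshift]; ring

-- ===== VERDICT (by name: the statement is the Claim_ definition above) =====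
theorem sum_of_fact_spec : Claim_equal_sum_of_fact := by
  intro n _
  exact sum_of_fact_eq_alt n
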